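-- pv_equiv track=rewrite | github.com/Alexandregirbal/Maths-D | enum.py | enumTriplets
-- ===== SOURCE A (Python) =====
-- def liste3(liste):
--     listeResultat=[]
--     n = len(liste)
--     for i in range(1,n+1,1):
--         for j in range(i+1,n+1,1):
--             for k in range(j+1,n+1,1):
--                 listeResultat.append([liste[i-1],liste[j-1],liste[k-1]])
--     return listeResultat
--
-- def enumTriplets(triplet,dbt,elements,enum):
--
--     if (triplet < 0):
--         return ([])
--
--     elif triplet>0 :
--         t = triplet-1
--         perm = liste3(elements)
--         borne = len(perm)//triplet
--         for j in range(borne):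
--             tmp = [l for l in dbt]
--             tmp.append(perm[j])
--             diff = [k for k in elements]
--             diff.remove(perm[j][0])
--             diff.remove(perm[j][1])
--             diff.remove(perm[j][2])
--
--             enumTriplets(t,tmp,diff,enum)
--
--     elif (triplet==0):
--         enum.append(dbt)
--
--     return (enum)
-- ===== SOURCE B (Python) =====
-- def liste3(liste):
--     listeResultat=[]
--     n = len(liste)
--     for i in range(1,n+1,1):
--         for j in range(i+1,n+1,1):
--             for k in range(j+1,n+1,1):
--                 listeResultat.append([liste[i-1],liste[j-1],liste[k-1]])
--     return listeResultat
--
-- def enumTriplets(triplet, dbt, elements, enum):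
--     # Iterative DFS with an explicit stack of (triplet, dbt, elements) frames
--     # instead of A's recursion; same preorder, same result appended into enum.
--     if triplet < 0:
--         return []
--     stack = [(triplet, list(dbt), list(elements))]
--     while stack:
--         t, cur, elems = stack.pop()
--         if t == 0:
--             enum.append(cur)
--         else:
--             perm = liste3(elems)
--             borne = len(perm) // t
--             for j in reversed(range(borne)):
--                 triple = perm[j]
--                 rest = list(elems)
--                 rest.remove(triple[0])
--                 rest.remove(triple[1])
--                 rest.remove(triple[2])
--                 stack.append((t - 1, cur + [triple], rest))
--     return enum
-- ===== Notes on version B (the rewrite author's own statement) =====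
-- stated objective: alternative
-- what changed: A's recursion is replaced by an iterative DFS over an explicit stack of (triplet, partial-partition, remaining-elements) frames; children are pushed in reverse order so the preorder traversal and hence the output order match A exactly.
import Mathlib
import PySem

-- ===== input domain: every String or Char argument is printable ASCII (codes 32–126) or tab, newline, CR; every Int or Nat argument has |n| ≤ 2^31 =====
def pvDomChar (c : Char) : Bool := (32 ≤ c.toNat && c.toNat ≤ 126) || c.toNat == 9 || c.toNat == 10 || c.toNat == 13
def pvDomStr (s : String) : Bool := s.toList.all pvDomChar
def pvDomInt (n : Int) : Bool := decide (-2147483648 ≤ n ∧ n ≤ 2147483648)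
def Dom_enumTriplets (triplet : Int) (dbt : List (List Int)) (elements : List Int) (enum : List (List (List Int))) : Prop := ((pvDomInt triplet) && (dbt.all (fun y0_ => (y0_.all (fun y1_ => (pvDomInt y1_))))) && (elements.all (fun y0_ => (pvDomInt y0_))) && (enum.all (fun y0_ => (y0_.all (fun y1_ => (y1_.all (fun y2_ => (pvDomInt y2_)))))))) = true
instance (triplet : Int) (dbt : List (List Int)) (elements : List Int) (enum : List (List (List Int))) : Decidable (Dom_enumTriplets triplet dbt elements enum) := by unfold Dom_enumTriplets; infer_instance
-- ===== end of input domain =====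

-- B replaces A's recursion by an iterative DFS over an explicit stack (children pushed in
-- reverse so the preorder matches); equivalence is about the RETURN value — in Python both
-- A and B mutate `enum` in place in the same way.

-- ===== PORT A =====
-- Python list.remove raises ValueError when x ∉ l; in both programs every removed value is
-- read out of the list itself, so the `.getD l` fallback never fires (exact on all reachable calls).
def pvRm (l : List Int) (x : Int) : List Int := (PySem.List.remove? l x).getD l

-- shared module helper liste3 (identical in A's module and in Source B)
def liste3 (liste : List Int) : List (List Int) :=
  let n : Int := liste.length
  (PySem.List.pyRange 1 (n+1) 1).foldl (fun acc i =>
    (PySem.List.pyRange (i+1) (n+1) 1).foldl (fun acc j =>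
      (PySem.List.pyRange (j+1) (n+1) 1).foldl (fun acc k =>
        acc ++ [[PySem.List.pyGetD liste (i-1) 0,
                 PySem.List.pyGetD liste (j-1) 0,
                 PySem.List.pyGetD liste (k-1) 0]]) acc) acc) []

def enumTriplets (triplet : Int) (dbt : List (List Int)) (elements : List Int) (enum : List (List (List Int))) : List (List (List Int)) :=
  if _h0 : triplet < 0 then []
  else if _h1 : triplet > 0 then
    let perm := liste3 elements
    let borne : Int := PySem.Int.floordiv (perm.length : Int) triplet
    -- for j in range(borne): recursive call mutates enum; its return value is that mutated enum
    (PySem.List.pyRange 0 borne 1).foldl (fun en j =>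
      enumTriplets (triplet - 1)
        (dbt ++ [PySem.List.pyGetD perm j []])
        (pvRm (pvRm (pvRm elements (PySem.List.pyGetD (PySem.List.pyGetD perm j []) 0 0))
                   (PySem.List.pyGetD (PySem.List.pyGetD perm j []) 1 0))
              (PySem.List.pyGetD (PySem.List.pyGetD perm j []) 2 0))
        en) enum
  else enum ++ [dbt]
termination_by triplet.toNat
decreasing_by omega

-- ===== PORT B =====
-- termination helpers for the explicit-stack loop (cited by dfsTriplets' decreasing_by)
theorem pvLen_flatMap_le {α β : Type} (l : List α) (g : α → List β) (m : Nat)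
    (h : ∀ x ∈ l, (g x).length ≤ m) : (l.flatMap g).length ≤ l.length * m := by
  induction l with
  | nil => simp
  | cons a l ih =>
    simp only [List.flatMap_cons, List.length_append, List.length_cons]
    have h1 := h a (by simp)
    have h2 := ih (fun x hx => h x (by simp [hx]))
    calc (g a).length + (l.flatMap g).length ≤ m + l.length * m := Nat.add_le_add h1 h2
      _ = (l.length + 1) * m := by ring

theorem liste3_length_le (l : List Int) :
    (liste3 l).length ≤ l.length * l.length * l.length := by
  unfold liste3
  simp only [PySem.List.foldl_append_singleton_eq_map, PySem.List.foldl_append_eq_flatMap,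
    List.nil_append]
  have hout : ((l.length : Int) + 1 - 1).toNat = l.length := by omega
  calc _ ≤ (PySem.List.pyRange 1 ((l.length : Int)+1) 1).length * (l.length * l.length) := by
        apply pvLen_flatMap_le
        intro i hi
        have hib := (PySem.List.mem_pyRange_one).1 hi
        calc _ ≤ (PySem.List.pyRange (i+1) ((l.length : Int)+1) 1).length * l.length := by
              apply pvLen_flatMap_le
              intro j hj
              have hjb := (PySem.List.mem_pyRange_one).1 hj
              simp only [List.length_map, PySem.List.length_pyRange_one]
              omega
          _ ≤ l.length * l.length := by
              have : (PySem.List.pyRange (i+1) ((l.length : Int)+1) 1).length ≤ l.length := by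
                simp only [PySem.List.length_pyRange_one]; omega
              exact Nat.mul_le_mul_right _ this
    _ = l.length * l.length * l.length := by
        simp only [PySem.List.length_pyRange_one, hout]; ring

theorem pvRm_length_le (l : List Int) (x : Int) : (pvRm l x).length ≤ l.length := by
  unfold pvRm
  by_cases hx : x ∈ l
  · rw [PySem.List.remove?_eq_some_erase l x hx]
    simpa using l.length_erase_le (a := x)
  · rw [(PySem.List.remove?_eq_none_iff l x).2 hx]
    simp

def dfsMeasure (st : List (Int × List (List Int) × List Int)) : Nat :=
  (st.map (fun f => (f.2.2.length * f.2.2.length * f.2.2.length + 1) ^ f.1.toNat)).sum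

theorem dfsMeasure_cons_lt (t : Int) (cur : List (List Int)) (elems : List Int)
    (rest children : List (Int × List (List Int) × List Int))
    (hn : children.length ≤ elems.length * elems.length * elems.length)
    (hc : ∀ c ∈ children, c.1.toNat < t.toNat ∧ c.2.2.length ≤ elems.length)
    (hne : children = [] ∨ 0 < t.toNat) :
    dfsMeasure (children ++ rest) < dfsMeasure ((t, cur, elems) :: rest) := by
  have hsplit : dfsMeasure (children ++ rest) = dfsMeasure children + dfsMeasure rest := by
    simp [dfsMeasure]
  have hcons : dfsMeasure ((t, cur, elems) :: rest)
      = (elems.length * elems.length * elems.length + 1) ^ t.toNat + dfsMeasure rest := by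
    simp [dfsMeasure]
  rw [hsplit, hcons]
  have hpos : 0 < (elems.length * elems.length * elems.length + 1) ^ t.toNat :=
    Nat.pow_pos (by omega)
  rcases hne with hnil | ht
  · subst hnil; simp [dfsMeasure]
  · set n3 := elems.length * elems.length * elems.length with hn3
    have hB : ∀ c ∈ children, (c.2.2.length * c.2.2.length * c.2.2.length + 1) ^ c.1.toNat
        ≤ (n3 + 1) ^ (t.toNat - 1) := by
      intro c hcmem
      obtain ⟨h1, h2⟩ := hc c hcmem
      calc (c.2.2.length * c.2.2.length * c.2.2.length + 1) ^ c.1.toNat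
          ≤ (n3 + 1) ^ c.1.toNat := by
            apply Nat.pow_le_pow_left
            have := Nat.mul_le_mul (Nat.mul_le_mul h2 h2) h2
            omega
        _ ≤ (n3 + 1) ^ (t.toNat - 1) := Nat.pow_le_pow_right (by omega) (by omega)
    have hsum : dfsMeasure children ≤ children.length * (n3 + 1) ^ (t.toNat - 1) := by
      unfold dfsMeasure
      have := List.sum_le_card_nsmul
        (children.map (fun f => (f.2.2.length * f.2.2.length * f.2.2.length + 1) ^ f.1.toNat))
        ((n3 + 1) ^ (t.toNat - 1))
        (by intro x hx
            obtain ⟨c, hcmem, rfl⟩ := List.mem_map.1 hx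
            exact hB c hcmem)
      simpa [smul_eq_mul] using this
    have hlt : children.length * (n3 + 1) ^ (t.toNat - 1) < (n3 + 1) ^ t.toNat := by
      have hBpos : 0 < (n3 + 1) ^ (t.toNat - 1) := Nat.pow_pos (by omega)
      calc children.length * (n3 + 1) ^ (t.toNat - 1)
          ≤ n3 * (n3 + 1) ^ (t.toNat - 1) := Nat.mul_le_mul_right _ hn
        _ < (n3 + 1) * (n3 + 1) ^ (t.toNat - 1) := by
            exact (Nat.mul_lt_mul_right hBpos).2 (by omega)
        _ = (n3 + 1) ^ (t.toNat - 1 + 1) := by rw [pow_succ]; ring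
        _ = (n3 + 1) ^ t.toNat := by congr 1; omega
    omega

def dfsTriplets (stack : List (Int × List (List Int) × List Int)) (enum : List (List (List Int))) : List (List (List Int)) :=
  match stack with
  | [] => enum
  | (t, cur, elems) :: rest =>
    if _h : t = 0 then dfsTriplets rest (enum ++ [cur])
    else
      -- children listed top-of-stack first (j = 0 first): Python pushes reversed(range(borne))
      -- onto the tail-top stack, which pops in increasing j order
      dfsTriplets
        ((PySem.List.pyRange 0 (PySem.Int.floordiv ((liste3 elems).length : Int) t) 1).map (fun j =>
          (t - 1,
           cur ++ [PySem.List.pyGetD (liste3 elems) j []],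
           pvRm (pvRm (pvRm elems (PySem.List.pyGetD (PySem.List.pyGetD (liste3 elems) j []) 0 0))
                      (PySem.List.pyGetD (PySem.List.pyGetD (liste3 elems) j []) 1 0))
                (PySem.List.pyGetD (PySem.List.pyGetD (liste3 elems) j []) 2 0))) ++ rest)
        enum
termination_by dfsMeasure stack
decreasing_by
  · simp only [dfsMeasure, List.map_cons, List.sum_cons]
    have hpos : 0 < (elems.length * elems.length * elems.length + 1) ^ t.toNat :=
      Nat.pow_pos (by omega)
    omega
  · apply dfsMeasure_cons_lt
    · rcases lt_trichotomy t 0 with hneg | hz | hpos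
      · have hb : PySem.Int.floordiv ((liste3 elems).length : Int) t ≤ 0 := by
          have hm := PySem.Int.mod_neg_bounds (a := ((liste3 elems).length : Int)) (b := t) hneg
          have heq := PySem.Int.floordiv_mul_add_mod ((liste3 elems).length : Int) t
          nlinarith [Int.natCast_nonneg (liste3 elems).length]
        simp only [List.length_map, PySem.List.length_pyRange_one]
        omega
      · exact absurd hz _h
      · have hfd : PySem.Int.floordiv ((liste3 elems).length : Int) t
            ≤ ((liste3 elems).length : Int) := by
          rw [PySem.Int.floordiv_eq_ediv_of_pos hpos]
          exact Int.ediv_le_self _ (Int.natCast_nonneg _)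
        have h3 := liste3_length_le elems
        simp only [List.length_map, PySem.List.length_pyRange_one]
        omega
    · intro c hcmem
      obtain ⟨j, hj, rfl⟩ := List.mem_map.1 hcmem
      have hjb := (PySem.List.mem_pyRange_one).1 hj
      have htpos : 0 < t := by
        by_contra htn
        have htneg : t < 0 := by omega
        have hm := PySem.Int.mod_neg_bounds (a := ((liste3 elems).length : Int)) (b := t) htneg
        have heq := PySem.Int.floordiv_mul_add_mod ((liste3 elems).length : Int) t
        nlinarith [Int.natCast_nonneg (liste3 elems).length]
      constructor
      · simp only; omega
      · simp only
        calc _ ≤ (pvRm (pvRm elems _) _).length := pvRm_length_le _ _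
          _ ≤ (pvRm elems _).length := pvRm_length_le _ _
          _ ≤ elems.length := pvRm_length_le _ _
    · by_cases htpos : 0 < t
      · right; omega
      · left
        have htneg : t < 0 := lt_of_le_of_ne (not_lt.1 htpos) _h
        have hb : PySem.Int.floordiv ((liste3 elems).length : Int) t ≤ 0 := by
          have hm := PySem.Int.mod_neg_bounds (a := ((liste3 elems).length : Int)) (b := t) htneg
          have heq := PySem.Int.floordiv_mul_add_mod ((liste3 elems).length : Int) t
          nlinarith [Int.natCast_nonneg (liste3 elems).length]
        rw [List.map_eq_nil_iff]
        exact PySem.List.pyRange_one_eq_nil (by omega)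

def enumTriplets_alt (triplet : Int) (dbt : List (List Int)) (elements : List Int) (enum : List (List (List Int))) : List (List (List Int)) :=
  if triplet < 0 then []
  else dfsTriplets [(triplet, dbt, elements)] enum

-- ===== PRECONDITION & SPEC =====
def Spec_enumTriplets (triplet : Int) (dbt : List (List Int)) (elements : List Int) (enum : List (List (List Int))) (out : List (List (List Int))) : Prop := out = enumTriplets_alt triplet dbt elements enum
instance (triplet : Int) (dbt : List (List Int)) (elements : List Int) (enum : List (List (List Int))) (out : List (List (List Int))) : Decidable (Spec_enumTriplets triplet dbt elements enum out) := by unfold Spec_enumTriplets; infer_instance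

-- ===== CLAIM (what is proved, stated in full; the proofs are below) =====
def Claim_equal_enumTriplets : Prop := ∀ (triplet : Int) (dbt : List (List Int)) (elements : List Int) (enum : List (List (List Int))), Dom_enumTriplets triplet dbt elements enum → Spec_enumTriplets triplet dbt elements enum (enumTriplets triplet dbt elements enum)

-- ===== LEMMAS AND PROOFS =====
-- pvSolve k d e: the list of completed partitions that A's recursion appends to enum
def pvSolve (k : Nat) (d : List (List Int)) (e : List Int) : List (List (List Int)) :=
  match k with
  | 0 => [d]
  | k+1 =>
    (PySem.List.pyRange 0 (PySem.Int.floordiv ((liste3 e).length : Int) ((k : Int) + 1)) 1).flatMap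
      (fun j =>
        pvSolve k (d ++ [PySem.List.pyGetD (liste3 e) j []])
          (pvRm (pvRm (pvRm e (PySem.List.pyGetD (PySem.List.pyGetD (liste3 e) j []) 0 0))
                      (PySem.List.pyGetD (PySem.List.pyGetD (liste3 e) j []) 1 0))
                (PySem.List.pyGetD (PySem.List.pyGetD (liste3 e) j []) 2 0)))

theorem enumTriplets_eq_solve (k : Nat) :
    ∀ (d : List (List Int)) (e : List Int) (enum : List (List (List Int))),
      enumTriplets (k : Int) d e enum = enum ++ pvSolve k d e := by
  induction k with
  | zero =>
    intro d e enum
    rw [enumTriplets]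
    norm_num [pvSolve]
  | succ k ih =>
    intro d e enum
    rw [enumTriplets]
    have h0 : ¬ ((k+1 : Nat) : Int) < 0 := by push_cast; omega
    have h1 : ((k+1 : Nat) : Int) > 0 := by push_cast; omega
    rw [dif_neg h0, dif_pos h1]
    have hc1 : ((k+1 : Nat) : Int) - 1 = (k : Int) := by push_cast; ring
    have hc2 : ((k+1 : Nat) : Int) = (k : Int) + 1 := by push_cast; ring
    simp only [hc1]
    simp only [hc2]
    have hcong := PySem.List.foldl_congr_mem
      (PySem.List.pyRange 0 (PySem.Int.floordiv ((liste3 e).length : Int) ((k : Int) + 1)) 1)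
      (fun en j =>
        enumTriplets (k : Int) (d ++ [PySem.List.pyGetD (liste3 e) j []])
          (pvRm (pvRm (pvRm e (PySem.List.pyGetD (PySem.List.pyGetD (liste3 e) j []) 0 0))
                      (PySem.List.pyGetD (PySem.List.pyGetD (liste3 e) j []) 1 0))
                (PySem.List.pyGetD (PySem.List.pyGetD (liste3 e) j []) 2 0)) en)
      (fun en j =>
        en ++ pvSolve k (d ++ [PySem.List.pyGetD (liste3 e) j []])
          (pvRm (pvRm (pvRm e (PySem.List.pyGetD (PySem.List.pyGetD (liste3 e) j []) 0 0))
                      (PySem.List.pyGetD (PySem.List.pyGetD (liste3 e) j []) 1 0))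
                (PySem.List.pyGetD (PySem.List.pyGetD (liste3 e) j []) 2 0)))
      enum (fun acc x _ => ih _ _ acc)
    rw [hcong, PySem.List.foldl_append_eq_flatMap]
    rfl

theorem dfs_eq_solve (k : Nat) :
    ∀ (d : List (List Int)) (e : List Int) (rest : List (Int × List (List Int) × List Int))
      (enum : List (List (List Int))),
      dfsTriplets (((k : Int), d, e) :: rest) enum = dfsTriplets rest (enum ++ pvSolve k d e) := by
  induction k with
  | zero =>
    intro d e rest enum
    rw [dfsTriplets]
    norm_num [pvSolve]
  | succ k ih =>
    intro d e rest enum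
    rw [dfsTriplets]
    have hz : ¬ ((k+1 : Nat) : Int) = 0 := by push_cast; omega
    rw [dif_neg hz]
    have hc1 : ((k+1 : Nat) : Int) - 1 = (k : Int) := by push_cast; ring
    have hc2 : ((k+1 : Nat) : Int) = (k : Int) + 1 := by push_cast; ring
    simp only [hc1]
    simp only [hc2]
    have inner : ∀ (js : List Int) (rest : List (Int × List (List Int) × List Int))
        (enum : List (List (List Int))),
        dfsTriplets ((js.map (fun j =>
          ((k : Int),
           d ++ [PySem.List.pyGetD (liste3 e) j []],
           pvRm (pvRm (pvRm e (PySem.List.pyGetD (PySem.List.pyGetD (liste3 e) j []) 0 0))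
                      (PySem.List.pyGetD (PySem.List.pyGetD (liste3 e) j []) 1 0))
                (PySem.List.pyGetD (PySem.List.pyGetD (liste3 e) j []) 2 0))) ++ rest)) enum
          = dfsTriplets rest (enum ++ js.flatMap (fun j =>
              pvSolve k (d ++ [PySem.List.pyGetD (liste3 e) j []])
                (pvRm (pvRm (pvRm e (PySem.List.pyGetD (PySem.List.pyGetD (liste3 e) j []) 0 0))
                            (PySem.List.pyGetD (PySem.List.pyGetD (liste3 e) j []) 1 0))
                      (PySem.List.pyGetD (PySem.List.pyGetD (liste3 e) j []) 2 0)))) := by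
      intro js
      induction js with
      | nil => intro rest enum; simp
      | cons j0 js ihjs =>
        intro rest enum
        simp only [List.map_cons, List.cons_append, List.flatMap_cons]
        rw [ih, ihjs, List.append_assoc]
    rw [inner]
    rfl

theorem enumTriplets_spec_aux (triplet : Int) (dbt : List (List Int)) (elements : List Int)
    (enum : List (List (List Int))) :
    enumTriplets triplet dbt elements enum = enumTriplets_alt triplet dbt elements enum := by
  by_cases hneg : triplet < 0
  · rw [enumTriplets, enumTriplets_alt, dif_pos hneg, if_pos hneg]
  · have hk : triplet = (triplet.toNat : Int) := by omega
    rw [enumTriplets_alt, if_neg hneg, hk, dfs_eq_solve, enumTriplets_eq_solve, dfsTriplets]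

-- ===== VERDICT (by name: the statement is the Claim_ definition above) =====
theorem enumTriplets_spec : Claim_equal_enumTriplets := by
  intro triplet dbt elements enum _
  exact enumTriplets_spec_aux triplet dbt elements enum
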